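-- pv_equiv track=rewrite | github.com/jintak0401/Problem_Solving | 0_10000/1001_2000/1562.py | solve
-- ===== SOURCE A (Python) =====
-- def solve(length):
--
--     arr = [[[0 for _ in range(1 << 10)] for _ in range(10)] for _ in range(length)]
--
--     for i in range(1, 10):
--         arr[0][i][1 << i] = 1
--
--     for i in range(1, length):
--         for j in range(10):
--             for k in range(1 << 10):
--                 bit = k | (1 << j)
--                 if j > 0:
--                     arr[i][j][bit] += arr[i - 1][j - 1][k]
--                 if j < 9:
--                     arr[i][j][bit] += arr[i - 1][j + 1][k]
--
--     sum_val = 0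
--     for i in range(10):
--         sum_val += arr[-1][i][(1 << 10) - 1]
--
--     return sum_val % 1000000000
-- ===== SOURCE B (Python) =====
-- def solve(length):
--     # A staircase number's visited-digit set is an interval, so "uses all digits"
--     # means it visits both 0 and 9; count by inclusion-exclusion over walks on a
--     # digit path confined to [0,9], [1,9], [0,8], [1,8] (first digit nonzero).
--     def walks(m, skip_zero):
--         cur = [0 if (skip_zero and v == 0) else 1 for v in range(m)]
--         for _ in range(length - 1):
--             cur = [(cur[v - 1] if v > 0 else 0) + (cur[v + 1] if v < m - 1 else 0)
--                    for v in range(m)]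
--         return sum(cur)
--     return (walks(10, True) - walks(9, False) - walks(9, True) + walks(8, False)) % 1000000000
-- ===== Notes on version B (the rewrite author's own statement) =====
-- stated objective: faster
-- what changed: A runs a DP over all (digit, visited-bitmask) states; B drops the bitmask entirely: since adjacent digits differ by 1 the visited set is an interval, so 'all digits used' is equivalent to 'visits 0 and 9', and B counts plain walks on four digit paths ([0,9],[1,9],[0,8],[1,8]) combined by inclusion-exclusion.
-- crash fix: On length <= 0, A raises IndexError (arr[-1] on the empty table) while B returns 0. — e.g. on solve(0): A raises IndexError, B returns 0
import Mathlib
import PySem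

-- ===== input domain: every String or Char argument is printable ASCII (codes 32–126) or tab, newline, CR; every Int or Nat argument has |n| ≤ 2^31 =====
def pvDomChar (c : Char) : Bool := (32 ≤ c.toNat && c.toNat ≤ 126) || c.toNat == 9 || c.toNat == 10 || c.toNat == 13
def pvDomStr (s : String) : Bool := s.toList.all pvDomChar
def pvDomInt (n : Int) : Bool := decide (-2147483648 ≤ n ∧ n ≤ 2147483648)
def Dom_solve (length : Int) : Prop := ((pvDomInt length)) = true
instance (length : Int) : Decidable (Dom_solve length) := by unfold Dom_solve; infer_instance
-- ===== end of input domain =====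

-- A runs a DP over (digit, visited-bitmask) states; B drops the bitmask: a staircase number's
-- visited-digit set is an interval, so 'uses all digits' = 'visits 0 and 9', and B counts plain
-- walks on four digit paths combined by inclusion-exclusion (timed measurably faster).

-- ===== PORT A =====
-- arr[i][j][b] access/update (Python lists are O(1) arrays, so the port uses Array; all loop indices are in range,
-- so getD/setIfInBounds are exact)
def aGet3 (arr : Array (Array (Array Int))) (i j b : Nat) : Int :=
  ((arr.getD i #[]).getD j #[]).getD b 0

def aSet3 (arr : Array (Array (Array Int))) (i j b : Nat) (v : Int) : Array (Array (Array Int)) :=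
  arr.setIfInBounds i ((arr.getD i #[]).setIfInBounds j (((arr.getD i #[]).getD j #[]).setIfInBounds b v))

-- [0 for _ in range(1 << 10)] and [[0 ...] for _ in range(10)]
def zeroRowA : Array Int := ((List.range 1024).map (fun _ => (0 : Int))).toArray
def zeroLayerA : Array (Array Int) := ((List.range 10).map (fun _ => zeroRowA)).toArray

-- body of the innermost k-loop (the two conditional '+=' statements)
def aInner (arr : Array (Array (Array Int))) (i j k : Nat) : Array (Array (Array Int)) :=
  let bit := k ||| (1 <<< j)
  let arr1 := if 0 < j then aSet3 arr i j bit (aGet3 arr i j bit + aGet3 arr (i-1) (j-1) k) else arr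
  if j < 9 then aSet3 arr1 i j bit (aGet3 arr1 i j bit + aGet3 arr1 (i-1) (j+1) k) else arr1

-- arr after allocation and the 'for i in range(1, 10)' initialisation loop
def aInit (length : Int) : Array (Array (Array Int)) :=
  (List.range' 1 9).foldl (fun a i => aSet3 a 0 i (1 <<< i) 1)
    ((PySem.List.pyRange 0 length 1).map (fun _ => zeroLayerA)).toArray

-- arr after the triple 'for i ... for j ... for k ...' loop
def aMain (length : Int) : Array (Array (Array Int)) :=
  (PySem.List.pyRange 1 length 1).foldl (fun a i =>
    (List.range 10).foldl (fun a j =>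
      (List.range 1024).foldl (fun a k => aInner a i.toNat j k) a) a) (aInit length)

def solve (length : Int) : Int :=
  match PySem.List.pyGet? (aMain length).toList (-1) with
  | none => 0   -- Python raises IndexError here (arr[-1] on the empty arr, i.e. length <= 0); excluded by Pre_solve
  | some last =>
      PySem.Int.mod ((List.range 10).foldl (fun s i => s + ((last.getD i #[]).getD 1023 0)) 0) 1000000000

-- ===== PORT B =====
-- cur = [0 if (skip_zero and v == 0) else 1 for v in range(m)]
def bWalkInit (m : Nat) (skipZero : Bool) : List Int :=
  (List.range m).map (fun v => if skipZero ∧ v = 0 then 0 else 1)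

-- cur = [(cur[v-1] if v > 0 else 0) + (cur[v+1] if v < m-1 else 0) for v in range(m)]
-- (both indices are in range whenever the guard holds, so getD is exact)
def bWalkStep (m : Nat) (cur : List Int) : List Int :=
  (List.range m).map (fun v =>
    (if 0 < v then cur.getD (v-1) 0 else 0) + (if v < m-1 then cur.getD (v+1) 0 else 0))

-- def walks(m, skip_zero): ... for _ in range(length - 1): ... return sum(cur)
def bWalks (length : Int) (m : Nat) (skipZero : Bool) : Int :=
  ((PySem.List.pyRange 0 (length - 1) 1).foldl (fun cur _ => bWalkStep m cur)
    (bWalkInit m skipZero)).sum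

def solve_alt (length : Int) : Int :=
  PySem.Int.mod
    (bWalks length 10 true - bWalks length 9 false - bWalks length 9 true + bWalks length 8 false)
    1000000000

-- ===== PRECONDITION & SPEC =====
-- Pre_ excludes exactly length ≤ 0, where Python A raises IndexError (arr[-1] on the empty list)
def Pre_solve (length : Int) : Prop := 1 ≤ length
instance (length : Int) : Decidable (Pre_solve length) := by unfold Pre_solve; infer_instance

def pvWitness_solve : Int := 3

-- On length ≤ 0 A raises IndexError (arr[-1] on the empty list) while B returns 0 (no staircase numbers).
def Raises_solve (length : Int) : Prop := length ≤ 0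
instance (length : Int) : Decidable (Raises_solve length) := by unfold Raises_solve; infer_instance
def pvRaiseWitness_solve : Int := 0
def pvRaiseWitnessOut_solve : Int := 0

def Spec_solve (length : Int) (out : Int) : Prop := out = solve_alt length
instance (length : Int) (out : Int) : Decidable (Spec_solve length out) := by unfold Spec_solve; infer_instance

-- ===== CLAIM (what is proved, stated in full; the proofs are below) =====
def Claim_equal_solve : Prop := ∀ (length : Int), Dom_solve length → Pre_solve length → Spec_solve length (solve length)
def Claim_raises_solve : Prop := (∀ (length : Int), Dom_solve length → Raises_solve length → ¬ Pre_solve length) ∧ (Dom_solve (pvRaiseWitness_solve) ∧ Raises_solve (pvRaiseWitness_solve) ∧ solve_alt (pvRaiseWitness_solve) = pvRaiseWitnessOut_solve)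

-- ===== LEMMAS AND PROOFS =====

-- ---------- A-side List-level model ----------
def aGet3L (arr : List (List (List Int))) (i j b : Nat) : Int :=
  ((arr.getD i []).getD j []).getD b 0

def aSet3L (arr : List (List (List Int))) (i j b : Nat) (v : Int) : List (List (List Int)) :=
  arr.set i ((arr.getD i []).set j (((arr.getD i []).getD j []).set b v))

def zeroRow : List Int := (List.range 1024).map (fun _ => (0 : Int))
def zeroLayer : List (List Int) := (List.range 10).map (fun _ => zeroRow)

def aInnerL (arr : List (List (List Int))) (i j k : Nat) : List (List (List Int)) :=
  let bit := k ||| (1 <<< j)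
  let arr1 := if 0 < j then aSet3L arr i j bit (aGet3L arr i j bit + aGet3L arr (i-1) (j-1) k) else arr
  if j < 9 then aSet3L arr1 i j bit (aGet3L arr1 i j bit + aGet3L arr1 (i-1) (j+1) k) else arr1

def aInitL (length : Int) : List (List (List Int)) :=
  (List.range' 1 9).foldl (fun a i => aSet3L a 0 i (1 <<< i) 1)
    ((PySem.List.pyRange 0 length 1).map (fun _ => zeroLayer))

def aMainL (length : Int) : List (List (List Int)) :=
  (PySem.List.pyRange 1 length 1).foldl (fun a i =>
    (List.range 10).foldl (fun a j =>
      (List.range 1024).foldl (fun a k => aInnerL a i.toNat j k) a) a) (aInitL length)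

def solveL (length : Int) : Int :=
  match PySem.List.pyGet? (aMainL length) (-1) with
  | none => 0
  | some last =>
      PySem.Int.mod ((List.range 10).foldl (fun s i => s + ((last.getD i []).getD 1023 0)) 0) 1000000000

-- the mathematical layer: Gt t j b = number of staircase strings of length t+1 ending in digit j with digit-set b
def gstep (F : Nat → Nat → Int) (j b : Nat) : Int :=
  if (b &&& (1 <<< j)) ≠ 0 then
    (if 0 < j then F (j-1) b + F (j-1) (b ^^^ (1 <<< j)) else 0)
    + (if j < 9 then F (j+1) b + F (j+1) (b ^^^ (1 <<< j)) else 0)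
  else 0

def Gt : Nat → Nat → Nat → Int
  | 0, j, b => if 1 ≤ j ∧ b = 1 <<< j then 1 else 0
  | (t+1), j, b => gstep (Gt t) j b

def Lmap (F : Nat → Nat → Int) : List (List Int) :=
  (List.range 10).map (fun j => (List.range 1024).map (fun b => F j b))

-- generic getD/set facts
theorem gset_self {α : Type} (d : α) (l : List α) (i : Nat) (v : α) (h : i < l.length) :
    (l.set i v).getD i d = v := by
  simp [List.getD_eq_getElem?_getD, h]

theorem gset_ne {α : Type} (d : α) (l : List α) (i i' : Nat) (v : α) (h : i ≠ i') :
    (l.set i v).getD i' d = l.getD i' d := by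
  simp [List.getD_eq_getElem?_getD, List.getElem?_set_ne h]

theorem Lmap_length (F : Nat → Nat → Int) : (Lmap F).length = 10 := by
  unfold Lmap; rw [List.length_map, List.length_range]

theorem Lmap_getD (F : Nat → Nat → Int) (j : Nat) (hj : j < 10) :
    (Lmap F).getD j [] = (List.range 1024).map (fun b => F j b) :=
  PySem.List.getD_map_range _ _ _ _ hj

theorem Lmap_get (F : Nat → Nat → Int) (j b : Nat) (hj : j < 10) (hb : b < 1024) :
    ((Lmap F).getD j []).getD b 0 = F j b := by
  rw [Lmap_getD F j hj]; exact PySem.List.getD_map_range _ _ _ _ hb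

theorem zeroLayer_getD (j : Nat) (hj : j < 10) : zeroLayer.getD j [] = zeroRow :=
  PySem.List.getD_map_range _ _ _ _ hj

theorem zeroRow_getD (b : Nat) (hb : b < 1024) : zeroRow.getD b 0 = 0 :=
  PySem.List.getD_map_range _ _ _ _ hb

theorem zeroRow_length : zeroRow.length = 1024 := by
  unfold zeroRow; rw [List.length_map, List.length_range]

theorem zeroLayer_length : zeroLayer.length = 10 := by
  unfold zeroLayer; rw [List.length_map, List.length_range]

-- bit facts about masks below 1024
theorem bit_mem (b j : Nat) : (b &&& (1 <<< j) ≠ 0) ↔ b.testBit j = true := by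
  rw [Nat.one_shiftLeft, Nat.and_two_pow]
  cases h : b.testBit j <;> simp

theorem lor_testBit_self (k j : Nat) : (k ||| (1 <<< j)).testBit j = true := by
  simp [Nat.one_shiftLeft, Nat.testBit_or]

theorem testBit_one_shiftLeft (j i : Nat) : (1 <<< j).testBit i = decide (j = i) := by
  rw [Nat.one_shiftLeft, Nat.testBit_two_pow]

theorem lor_eq_self (b j : Nat) (h : b.testBit j = true) : b ||| (1 <<< j) = b := by
  rw [Nat.one_shiftLeft]
  apply Nat.eq_of_testBit_eq
  intro i
  by_cases hij : j = i
  · subst hij; simp [Nat.testBit_or, h]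
  · simp [Nat.testBit_or, hij]

theorem xor_lor (b j : Nat) (h : b.testBit j = true) : (b ^^^ (1 <<< j)) ||| (1 <<< j) = b := by
  rw [Nat.one_shiftLeft]
  apply Nat.eq_of_testBit_eq
  intro i
  by_cases hij : j = i
  · subst hij; simp [Nat.testBit_or, Nat.testBit_xor, h]
  · simp [Nat.testBit_or, Nat.testBit_xor, hij]

theorem xor_ne (b j : Nat) (h : b.testBit j = true) : b ^^^ (1 <<< j) ≠ b := by
  intro e
  have := congrArg (fun x => Nat.testBit x j) e
  simp [Nat.one_shiftLeft, Nat.testBit_xor, h] at this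

theorem lor_cases (k b j : Nat) (h : k ||| (1 <<< j) = b) : k = b ∨ k = b ^^^ (1 <<< j) := by
  rw [Nat.one_shiftLeft] at h
  have hb : ∀ i, (k.testBit i || decide (j = i)) = b.testBit i := by
    intro i
    have := congrArg (fun x => Nat.testBit x i) h
    simpa [Nat.testBit_or, Nat.testBit_two_pow] using this
  by_cases hk : k.testBit j = true
  · left
    apply Nat.eq_of_testBit_eq
    intro i
    by_cases hij : j = i
    · subst hij; rw [← hb j]; simp [hk]
    · simpa [hij] using hb i
  · right
    have hk' : k.testBit j = false := by revert hk; cases k.testBit j <;> simp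
    rw [Nat.one_shiftLeft]
    apply Nat.eq_of_testBit_eq
    intro i
    rw [Nat.testBit_xor, Nat.testBit_two_pow]
    by_cases hij : j = i
    · subst hij; rw [← hb j]; simp [hk']
    · simpa [hij] using hb i

theorem xor_lt (b j : Nat) (hb : b < 1024) (hj : j < 10) : b ^^^ (1 <<< j) < 1024 := by
  rw [Nat.one_shiftLeft]
  exact Nat.xor_lt_two_pow (n := 10) hb (Nat.pow_lt_pow_right (by norm_num) hj)

theorem lor_lt (k j : Nat) (hk : k < 1024) (hj : j < 10) : k ||| (1 <<< j) < 1024 := by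
  rw [Nat.one_shiftLeft]
  exact Nat.or_lt_two_pow (n := 10) hk (Nat.pow_lt_pow_right (by norm_num) hj)

-- sums
theorem sum_ite_single (n b : Nat) (c : Int) (hb : b < n) :
    ((List.range n).map (fun k => if k = b then c else 0)).sum = c := by
  induction n with
  | zero => omega
  | succ n ih =>
      rw [List.range_succ, List.map_append, List.sum_append]
      by_cases h : b = n
      · subst h
        have hz : ((List.range b).map (fun k => if k = b then c else 0)).sum = 0 := by
          apply List.sum_eq_zero
          intro x hx
          obtain ⟨k, hk, rfl⟩ := List.mem_map.mp hx
          simp only [List.mem_range] at hk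
          simp [Nat.ne_of_lt hk]
        simp [hz]
      · have hb' : b < n := by omega
        have hn : n ≠ b := fun e => h e.symm
        simp [ih hb', hn]

theorem sum_scatter_gather (j b : Nat) (hj : j < 10) (hb : b < 1024) (v : Nat → Int) :
    ((List.range 1024).map (fun k => if k ||| (1 <<< j) = b then v k else 0)).sum
      = if b &&& (1 <<< j) ≠ 0 then v b + v (b ^^^ (1 <<< j)) else 0 := by
  by_cases hbit : b.testBit j = true
  · rw [if_pos ((bit_mem b j).mpr hbit)]
    have hpt : ∀ k : Nat, (if k ||| (1 <<< j) = b then v k else 0)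
        = (if k = b then v b else 0) + (if k = b ^^^ (1 <<< j) then v (b ^^^ (1 <<< j)) else 0) := by
      intro k
      by_cases h1 : k = b
      · subst h1
        rw [if_pos (lor_eq_self k j hbit), if_pos rfl,
            if_neg (fun e => xor_ne k j hbit e.symm)]
        simp
      · by_cases h2 : k = b ^^^ (1 <<< j)
        · subst h2
          rw [if_pos (xor_lor b j hbit), if_neg h1, if_pos rfl]
          simp
        · have hno : ¬ (k ||| (1 <<< j) = b) := by
            intro h
            rcases lor_cases k b j h with h' | h' <;> [exact h1 h'; exact h2 h']
          rw [if_neg hno, if_neg h1, if_neg h2]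
          simp
    calc ((List.range 1024).map (fun k => if k ||| (1 <<< j) = b then v k else 0)).sum
        = ((List.range 1024).map (fun k => (if k = b then v b else 0) + (if k = b ^^^ (1 <<< j) then v (b ^^^ (1 <<< j)) else 0))).sum := by
          exact congrArg List.sum (List.map_congr_left (fun k _ => hpt k))
      _ = v b + v (b ^^^ (1 <<< j)) := by
          rw [PySem.List.sum_map_add_int]
          rw [sum_ite_single 1024 b _ hb, sum_ite_single 1024 _ _ (xor_lt b j hb hj)]
  · rw [if_neg (fun hcon => hbit ((bit_mem b j).mp hcon))]
    apply List.sum_eq_zero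
    intro x hx
    obtain ⟨k, _, rfl⟩ := List.mem_map.mp hx
    have hno : ¬ (k ||| (1 <<< j) = b) := fun h => hbit (h ▸ lor_testBit_self k j)
    simp [hno]

-- scatter fold on one 1024-cell row
theorem scatter_getD (f : Nat → Nat) (g : Nat → Int) (ks : List Nat) :
    ∀ (c : List Int), (∀ k ∈ ks, f k < c.length) → ∀ b, b < c.length →
      (ks.foldl (fun c k => c.set (f k) (c.getD (f k) 0 + g k)) c).getD b 0
        = c.getD b 0 + (ks.map (fun k => if f k = b then g k else 0)).sum := by
  induction ks with
  | nil => intro c _ b _; simp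
  | cons k ks ih =>
      intro c hf b hb
      have hk : f k < c.length := hf k (by simp)
      have hlen : (c.set (f k) (c.getD (f k) 0 + g k)).length = c.length := by simp
      rw [List.foldl_cons, ih _ (by intro x hx; rw [hlen]; exact hf x (by simp [hx])) b (by rw [hlen]; exact hb)]
      rw [List.map_cons, List.sum_cons]
      by_cases h : f k = b
      · subst h
        rw [gset_self _ _ _ _ hk, if_pos rfl]
        ring
      · rw [gset_ne _ _ _ _ _ h, if_neg h]
        ring

-- contribution pushed by digit j from predecessor mask k
def gcontrib (prev : List (List Int)) (j k : Nat) : Int :=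
  (if 0 < j then (prev.getD (j-1) []).getD k 0 else 0) + (if j < 9 then (prev.getD (j+1) []).getD k 0 else 0)

def cellstep (prev : List (List Int)) (j : Nat) (c : List Int) (k : Nat) : List Int :=
  c.set (k ||| (1 <<< j)) (c.getD (k ||| (1 <<< j)) 0 + gcontrib prev j k)

theorem cellstep_length (prev : List (List Int)) (j : Nat) (c : List Int) (k : Nat) :
    (cellstep prev j c k).length = c.length := by simp [cellstep]

-- the two sequential '+=' of aInnerL are one scatter update of the cell (i, j, k|(1<<j))
theorem aInner_eq (arr : List (List (List Int))) (i j k : Nat)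
    (h1 : 1 ≤ i) (h2 : i < arr.length) (h3 : j < (arr.getD i []).length)
    (h4 : k ||| (1 <<< j) < ((arr.getD i []).getD j []).length) :
    aInnerL arr i j k
      = arr.set i ((arr.getD i []).set j (cellstep (arr.getD (i-1) []) j ((arr.getD i []).getD j []) k)) := by
  have hii : i ≠ i - 1 := by omega
  by_cases hj0 : 0 < j
  · by_cases hj9 : j < 9
    · simp only [aInnerL, aSet3L, aGet3L, if_pos hj0, if_pos hj9, cellstep, gcontrib]
      rw [gset_self ([] : List (List Int)) arr i _ h2,
          gset_self ([] : List Int) (arr.getD i []) j _ h3,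
          gset_self (0 : Int) ((arr.getD i []).getD j []) _ _ h4,
          gset_ne ([] : List (List Int)) arr i (i-1) _ hii,
          List.set_set, List.set_set, List.set_set, add_assoc]
    · simp only [aInnerL, aSet3L, aGet3L, if_pos hj0, if_neg hj9, cellstep, gcontrib, add_zero]
  · by_cases hj9 : j < 9
    · simp only [aInnerL, aSet3L, aGet3L, if_neg hj0, if_pos hj9, cellstep, gcontrib, zero_add]
    · omega

theorem cellfold_length (prev : List (List Int)) (j : Nat) (ks : List Nat) :
    ∀ c : List Int, (ks.foldl (fun c k => cellstep prev j c k) c).length = c.length := by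
  induction ks with
  | nil => intro c; rfl
  | cons k ks ih => intro c; rw [List.foldl_cons, ih, cellstep_length]

theorem foldK (i j : Nat) (ks : List Nat) (hks : ∀ k ∈ ks, k ||| (1 <<< j) < 1024) :
    ∀ (arr : List (List (List Int))), 1 ≤ i → i < arr.length → j < (arr.getD i []).length →
      ((arr.getD i []).getD j []).length = 1024 →
      ks.foldl (fun a k => aInnerL a i j k) arr
        = arr.set i ((arr.getD i []).set j
            (ks.foldl (fun c k => cellstep (arr.getD (i-1) []) j c k) ((arr.getD i []).getD j []))) := by
  induction ks with
  | nil =>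
      intro arr _ h2 h3 _
      rw [List.foldl_nil, List.foldl_nil, List.getD_eq_getElem _ _ h3, List.set_getElem_self,
          List.getD_eq_getElem _ _ h2, List.set_getElem_self]
  | cons k ks ih =>
      intro arr h1 h2 h3 hcl
      have hii : i - 1 ≠ i := by omega
      rw [List.foldl_cons, List.foldl_cons,
          aInner_eq arr i j k h1 h2 h3 (by rw [hcl]; exact hks k (by simp))]
      rw [ih (fun x hx => hks x (List.mem_cons_of_mem _ hx)) _ h1 (by simpa using h2)
            (by rw [gset_self _ arr i _ h2]; simpa using h3)
            (by rw [gset_self _ arr i _ h2, gset_self _ (arr.getD i []) j _ h3, cellstep_length]; exact hcl)]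
      rw [gset_self _ arr i _ h2, gset_self _ (arr.getD i []) j _ h3,
          gset_ne _ _ i (i-1) _ (fun e => hii e.symm), List.set_set, List.set_set]

theorem foldJ (i : Nat) (js : List Nat) (hjs : ∀ j ∈ js, j < 10) :
    ∀ (arr : List (List (List Int))), 1 ≤ i → i < arr.length →
      (∀ j ∈ js, j < (arr.getD i []).length) →
      (∀ j ∈ js, ((arr.getD i []).getD j []).length = 1024) →
      js.foldl (fun a j => (List.range 1024).foldl (fun a k => aInnerL a i j k) a) arr
        = arr.set i (js.foldl
            (fun row j => row.set j ((List.range 1024).foldl (fun c k => cellstep (arr.getD (i-1) []) j c k) (row.getD j [])))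
            (arr.getD i [])) := by
  induction js with
  | nil =>
      intro arr _ h2 _ _
      rw [List.foldl_nil, List.foldl_nil, List.getD_eq_getElem _ _ h2, List.set_getElem_self]
  | cons j js ih =>
      intro arr h1 h2 h3 h4
      have hii : i - 1 ≠ i := by omega
      have hj10 : j < 10 := hjs j (by simp)
      rw [List.foldl_cons, List.foldl_cons,
          foldK i j (List.range 1024) (fun k hk => lor_lt k j (List.mem_range.mp hk) hj10) arr h1 h2
            (h3 j (by simp)) (h4 j (by simp))]
      rw [ih (fun x hx => hjs x (List.mem_cons_of_mem _ hx)) _ h1 (by simpa using h2)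
            (by intro x hx; rw [gset_self _ arr i _ h2]; simpa using h3 x (List.mem_cons_of_mem _ hx))
            (by
              intro x hx
              rw [gset_self _ arr i _ h2]
              by_cases hxj : j = x
              · subst hxj
                rw [gset_self _ (arr.getD i []) j _ (h3 j (by simp)), cellfold_length]
                exact h4 j (by simp)
              · rw [gset_ne _ _ j x _ hxj]; exact h4 x (List.mem_cons_of_mem _ hx))]
      rw [gset_self _ arr i _ h2, gset_ne _ _ i (i-1) _ (fun e => hii e.symm), List.set_set]

theorem rowfold_getD (C : Nat → List Int → List Int) (js : List Nat) (hnd : js.Nodup) :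
    ∀ (row : List (List Int)), (∀ j ∈ js, j < row.length) → ∀ j', j' < row.length →
      (js.foldl (fun row j => row.set j (C j (row.getD j []))) row).getD j' []
        = if j' ∈ js then C j' (row.getD j' []) else row.getD j' [] := by
  induction js with
  | nil => intro row _ j' _; simp
  | cons j js ih =>
      intro row hlt j' hj'
      rw [List.foldl_cons]
      have hnd' : js.Nodup := hnd.of_cons
      have hjnot : j ∉ js := (List.nodup_cons.mp hnd).1
      rw [ih hnd' _ (by intro x hx; simpa using hlt x (List.mem_cons_of_mem _ hx)) j' (by simpa using hj')]
      by_cases hmem : j' ∈ js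
      · have hne : j ≠ j' := fun e => hjnot (e ▸ hmem)
        rw [if_pos hmem, if_pos (List.mem_cons_of_mem _ hmem), gset_ne _ _ j j' _ hne]
      · by_cases hjj : j' = j
        · subst hjj
          rw [if_neg hmem, if_pos (by simp), gset_self _ row j' _ (hlt j' (by simp))]
        · rw [if_neg hmem, if_neg (by simp [hjj, hmem]), gset_ne _ _ j j' _ (fun e => hjj e.symm)]

theorem rowfold_length (C : Nat → List Int → List Int) (js : List Nat) :
    ∀ (row : List (List Int)),
      (js.foldl (fun row j => row.set j (C j (row.getD j []))) row).length = row.length := by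
  induction js with
  | nil => intro row; rfl
  | cons j js ih => intro row; rw [List.foldl_cons, ih]; simp

theorem cell_result (F : Nat → Nat → Int) (j : Nat) (hj : j < 10) (b : Nat) (hb : b < 1024) :
    ((List.range 1024).foldl (fun c k => cellstep (Lmap F) j c k) zeroRow).getD b 0 = gstep F j b := by
  have hsc := scatter_getD (fun k => k ||| (1 <<< j)) (fun k => gcontrib (Lmap F) j k) (List.range 1024)
      zeroRow (by intro k hk; rw [zeroRow_length]; exact lor_lt k j (List.mem_range.mp hk) hj)
      b (by rw [zeroRow_length]; exact hb)
  have hcell : (fun (c : List Int) (k : Nat) => cellstep (Lmap F) j c k)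
      = fun c k => c.set (k ||| (1 <<< j)) (c.getD (k ||| (1 <<< j)) 0 + gcontrib (Lmap F) j k) := rfl
  rw [hcell, hsc, zeroRow_getD b hb]
  have hmap : (List.range 1024).map (fun k => if k ||| (1 <<< j) = b then gcontrib (Lmap F) j k else 0)
      = (List.range 1024).map (fun k =>
          if k ||| (1 <<< j) = b then
            ((if 0 < j then F (j-1) k else 0) + (if j < 9 then F (j+1) k else 0)) else 0) := by
    apply List.map_congr_left
    intro k hk
    have hk' : k < 1024 := List.mem_range.mp hk
    by_cases h : k ||| (1 <<< j) = b
    · rw [if_pos h, if_pos h]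
      unfold gcontrib
      by_cases hj0 : 0 < j <;> by_cases hj9 : j < 9
      · rw [if_pos hj0, if_pos hj9, if_pos hj0, if_pos hj9,
            Lmap_get F (j-1) k (by omega) hk', Lmap_get F (j+1) k (by omega) hk']
      · rw [if_pos hj0, if_neg hj9, if_pos hj0, if_neg hj9,
            Lmap_get F (j-1) k (by omega) hk']
      · rw [if_neg hj0, if_pos hj9, if_neg hj0, if_pos hj9,
            Lmap_get F (j+1) k (by omega) hk']
      · rw [if_neg hj0, if_neg hj9, if_neg hj0, if_neg hj9]
    · rw [if_neg h, if_neg h]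
  rw [hmap, sum_scatter_gather j b hj hb _]
  unfold gstep
  split_ifs <;> ring

-- one main-loop iteration turns the zero row i into the Gt-layer (t+1), given row i-1 is the Gt-layer t
theorem step_G (t i : Nat) (arr : List (List (List Int))) (h1 : 1 ≤ i) (h2 : i < arr.length)
    (hprev : arr.getD (i-1) [] = Lmap (Gt t)) (hcur : arr.getD i [] = zeroLayer) :
    (List.range 10).foldl (fun a j => (List.range 1024).foldl (fun a k => aInnerL a i j k) a) arr
      = arr.set i (Lmap (Gt (t+1))) := by
  rw [foldJ i (List.range 10) (fun j hj => List.mem_range.mp hj) arr h1 h2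
        (by intro j hj; rw [hcur, zeroLayer_length]; exact List.mem_range.mp hj)
        (by intro j hj; rw [hcur, zeroLayer_getD j (List.mem_range.mp hj), zeroRow_length])]
  congr 1
  have hCL := rowfold_length (fun j c => (List.range 1024).foldl (fun c k => cellstep (arr.getD (i-1) []) j c k) c) (List.range 10) (arr.getD i [])
  apply List.ext_getElem
  · rw [hCL, hcur, zeroLayer_length, Lmap_length]
  · intro j' hja hjb
    have hj10 : j' < 10 := by rw [hCL, hcur, zeroLayer_length] at hja; exact hja
    rw [← List.getD_eq_getElem _ [] hja, ← List.getD_eq_getElem _ [] hjb]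
    rw [rowfold_getD (fun j c => (List.range 1024).foldl (fun c k => cellstep (arr.getD (i-1) []) j c k) c)
          (List.range 10) (List.nodup_range) _
          (by intro x hx; rw [hcur, zeroLayer_length]; exact List.mem_range.mp hx) j'
          (by rw [hcur, zeroLayer_length]; exact hj10)]
    rw [if_pos (List.mem_range.mpr hj10), hprev, hcur, zeroLayer_getD j' hj10,
        Lmap_getD _ j' hj10]
    apply List.ext_getElem
    · rw [cellfold_length, zeroRow_length]; simp
    · intro b hba hbb
      have hb1024 : b < 1024 := by rw [cellfold_length, zeroRow_length] at hba; exact hba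
      rw [← List.getD_eq_getElem _ 0 hba, ← List.getD_eq_getElem _ 0 hbb]
      rw [cell_result (Gt t) j' hj10 b hb1024,
          PySem.List.getD_map_range _ _ _ _ hb1024]
      rfl

def rowsUpTo (m n : Nat) : List (List (List Int)) :=
  (List.range m).map (fun t => Lmap (Gt t)) ++ List.replicate (n - m) zeroLayer

theorem rowsUpTo_length (m n : Nat) (h : m ≤ n) : (rowsUpTo m n).length = n := by
  simp [rowsUpTo]; omega

theorem rowsUpTo_getD_lt (m n t : Nat) (h : t < m) : (rowsUpTo m n).getD t [] = Lmap (Gt t) := by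
  unfold rowsUpTo
  rw [List.getD_eq_getElem?_getD, List.getElem?_append_left (by simp [h]),
      ← List.getD_eq_getElem?_getD]
  exact PySem.List.getD_map_range _ _ _ _ h

theorem rowsUpTo_getD_eq (m n : Nat) (h : m < n) : (rowsUpTo m n).getD m [] = zeroLayer := by
  unfold rowsUpTo
  rw [List.getD_eq_getElem?_getD, List.getElem?_append_right (by simp)]
  have h0 : m - ((List.range m).map (fun t => Lmap (Gt t))).length = 0 := by simp
  rw [h0, List.getElem?_replicate, if_pos (by omega)]
  rfl

theorem rowsUpTo_set (m n : Nat) (h1 : m < n) :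
    (rowsUpTo m n).set m (Lmap (Gt m)) = rowsUpTo (m+1) n := by
  unfold rowsUpTo
  rw [show n - m = (n - (m+1)) + 1 from (by omega), List.replicate_succ, List.range_succ,
      List.map_append]
  have hlen : ((List.range m).map (fun t => Lmap (Gt t))).length = m := by simp
  rw [← hlen]
  simp

theorem init_fold (js : List Nat) :
    ∀ (r : List (List Int)) (rest : List (List (List Int))),
      js.foldl (fun a i => aSet3L a 0 i (1 <<< i) 1) (r :: rest)
        = (js.foldl (fun r i => r.set i ((r.getD i []).set (1 <<< i) 1)) r) :: rest := by
  induction js with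
  | nil => intro r rest; rfl
  | cons j js ih =>
      intro r rest
      rw [List.foldl_cons, List.foldl_cons, ← ih]
      rfl

set_option maxRecDepth 40000 in
theorem init_row :
    (List.range' 1 9).foldl (fun r i => r.set i ((r.getD i []).set (1 <<< i) 1)) zeroLayer
      = Lmap (Gt 0) := by
  decide

theorem aInit_eq (n : Nat) (hn : 1 ≤ n) : aInitL (n : Int) = rowsUpTo 1 n := by
  unfold aInitL
  have hrep : (PySem.List.pyRange 0 (n : Int) 1).map (fun _ => zeroLayer)
      = List.replicate n zeroLayer := by
    have hlen : (((n : Int)) - 0).toNat = n := by omega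
    rw [List.map_const', PySem.List.length_pyRange_one, hlen]
  rw [hrep, show n = (n-1)+1 from (by omega), List.replicate_succ, init_fold, init_row]
  unfold rowsUpTo
  simp [List.range_one]

theorem main_inv (n : Nat) (hn : 1 ≤ n) :
    ∀ m, 1 ≤ m → m ≤ n →
      (PySem.List.pyRange 1 (m : Int) 1).foldl (fun a i =>
        (List.range 10).foldl (fun a j =>
          (List.range 1024).foldl (fun a k => aInnerL a i.toNat j k) a) a) (rowsUpTo 1 n)
        = rowsUpTo m n := by
  intro m
  induction m with
  | zero => omega
  | succ m ih =>
      intro _ hmn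
      by_cases hm : 1 ≤ m
      · have hstep := ih hm (by omega)
        have hcast : ((m+1 : Nat) : Int) = (m : Int) + 1 := by push_cast; ring
        rw [hcast, PySem.List.pyRange_one_succ_right (by exact_mod_cast hm), List.foldl_append,
            hstep, List.foldl_cons, List.foldl_nil]
        have htn : ((m : Int)).toNat = m := by omega
        rw [htn]
        rw [step_G (m-1) m (rowsUpTo m n) hm (by rw [rowsUpTo_length m n (by omega)]; omega)
              (rowsUpTo_getD_lt m n (m-1) (by omega)) (rowsUpTo_getD_eq m n (by omega))]
        rw [show m - 1 + 1 = m from (by omega), rowsUpTo_set m n (by omega)]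
      · have hm0 : m = 0 := by omega
        subst hm0
        rw [show ((1 : Nat) : Int) = 1 from rfl, PySem.List.pyRange_one_eq_nil (by norm_num),
            List.foldl_nil]

-- ===== bridge: the Array port A computes the List-level program (state through toList) =====
theorem agetD_toList {α : Type} (a : Array α) (i : Nat) (d : α) : a.toList.getD i d = a.getD i d := by
  rw [List.getD_eq_getElem?_getD, Array.getD]
  split
  · next h => rw [Array.getElem?_toList, a.getElem?_eq_getElem h]; rfl
  · next h => rw [Array.getElem?_toList, Array.getElem?_eq_none (by omega)]; rfl

theorem foldl_bridge {α β γ : Type} (h : α → β) (f : α → γ → α) (g : β → γ → β)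
    (H : ∀ b a, h (f b a) = g (h b) a) (l : List γ) (init : α) :
    h (l.foldl f init) = l.foldl g (h init) := by
  induction l generalizing init with
  | nil => rfl
  | cons x xs ih => rw [List.foldl_cons, List.foldl_cons, ih, H]

theorem pyGet?_map {α β : Type} (l : List α) (f : α → β) (i : Int) :
    PySem.List.pyGet? (l.map f) i = (PySem.List.pyGet? l i).map f := by
  simp [PySem.List.pyGet?, PySem.List.pyIdx?]

def tl2 (r : Array (Array Int)) : List (List Int) := r.toList.map Array.toList
def tl3 (a : Array (Array (Array Int))) : List (List (List Int)) := a.toList.map tl2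

theorem tl2_getD (r : Array (Array Int)) (j : Nat) : (tl2 r).getD j [] = (r.getD j #[]).toList := by
  unfold tl2
  rw [show ([] : List Int) = Array.toList (#[] : Array Int) from rfl, List.getD_map, agetD_toList]

theorem tl3_getD (a : Array (Array (Array Int))) (i : Nat) : (tl3 a).getD i [] = tl2 (a.getD i #[]) := by
  unfold tl3
  rw [show ([] : List (List Int)) = tl2 (#[] : Array (Array Int)) from rfl, List.getD_map, agetD_toList]

theorem tl3_set (a : Array (Array (Array Int))) (i : Nat) (r : Array (Array Int)) :
    tl3 (a.setIfInBounds i r) = (tl3 a).set i (tl2 r) := by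
  unfold tl3
  rw [Array.toList_setIfInBounds, List.map_set]

theorem tl2_set (r : Array (Array Int)) (j : Nat) (c : Array Int) :
    tl2 (r.setIfInBounds j c) = (tl2 r).set j c.toList := by
  unfold tl2
  rw [Array.toList_setIfInBounds, List.map_set]

theorem aGet3_bridge (arr : Array (Array (Array Int))) (i j b : Nat) :
    aGet3L (tl3 arr) i j b = aGet3 arr i j b := by
  unfold aGet3L aGet3
  rw [tl3_getD, tl2_getD, agetD_toList]

theorem aSet3_bridge (arr : Array (Array (Array Int))) (i j b : Nat) (v : Int) :
    tl3 (aSet3 arr i j b v) = aSet3L (tl3 arr) i j b v := by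
  unfold aSet3 aSet3L
  rw [tl3_set, tl2_set, Array.toList_setIfInBounds, tl3_getD, tl2_getD]

set_option maxRecDepth 8192 in
theorem aInner_bridge (arr : Array (Array (Array Int))) (i j k : Nat) :
    tl3 (aInner arr i j k) = aInnerL (tl3 arr) i j k := by
  simp only [aInner, aInnerL]
  by_cases hj0 : 0 < j <;> by_cases hj9 : j < 9 <;>
    simp only [hj0, hj9, if_true, if_false] <;>
    simp only [← aSet3_bridge, aGet3_bridge]

theorem tl2_zeroLayerA : tl2 zeroLayerA = zeroLayer := by
  unfold tl2 zeroLayerA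
  rw [List.toList_toArray, List.map_map]
  unfold zeroLayer
  apply List.map_congr_left
  intro x _
  show zeroRowA.toList = zeroRow
  unfold zeroRowA zeroRow
  exact List.toList_toArray

theorem aInit_bridge (length : Int) : tl3 (aInit length) = aInitL length := by
  unfold aInit aInitL
  rw [foldl_bridge tl3 (fun a i => aSet3 a 0 i (1 <<< i) 1) (fun b i => aSet3L b 0 i (1 <<< i) 1)
        (fun a i => aSet3_bridge a 0 i (1 <<< i) 1)]
  congr 1
  unfold tl3
  rw [List.toList_toArray, List.map_map]
  exact List.map_congr_left (fun x _ => tl2_zeroLayerA)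

theorem aMain_bridge (length : Int) : tl3 (aMain length) = aMainL length := by
  unfold aMain aMainL
  rw [foldl_bridge tl3
        (fun a (i : Int) => (List.range 10).foldl (fun a j => (List.range 1024).foldl (fun a k => aInner a i.toNat j k) a) a)
        (fun b (i : Int) => (List.range 10).foldl (fun b j => (List.range 1024).foldl (fun b k => aInnerL b i.toNat j k) b) b)
        (fun a i => foldl_bridge tl3
          (fun a j => (List.range 1024).foldl (fun a k => aInner a i.toNat j k) a)
          (fun b j => (List.range 1024).foldl (fun b k => aInnerL b i.toNat j k) b)
          (fun a j => foldl_bridge tl3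
            (fun a k => aInner a i.toNat j k)
            (fun b k => aInnerL b i.toNat j k)
            (fun a k => aInner_bridge a i.toNat j k) (List.range 1024) a) (List.range 10) a),
      aInit_bridge]

theorem solve_eq_solveL (length : Int) : solve length = solveL length := by
  unfold solve solveL
  rw [← aMain_bridge, show tl3 (aMain length) = (aMain length).toList.map tl2 from rfl, pyGet?_map]
  cases PySem.List.pyGet? (aMain length).toList (-1) with
  | none => rfl
  | some last =>
      simp only [Option.map_some]
      congr 2
      funext s i
      rw [tl2_getD, agetD_toList]

-- ---------- inclusion-exclusion core ----------

-- Gt t j b vanishes when bit j is not in b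
theorem gstep_zero (F : Nat → Nat → Int) (j b : Nat) (h : b.testBit j = false) :
    gstep F j b = 0 := by
  unfold gstep
  rw [if_neg]
  intro hc
  rw [(bit_mem b j).mp hc] at h
  exact Bool.false_ne_true h.symm

theorem Gt_zero (t j b : Nat) (h : b.testBit j = false) : Gt t j b = 0 := by
  cases t with
  | zero =>
      show (if 1 ≤ j ∧ b = 1 <<< j then (1:Int) else 0) = 0
      rw [if_neg]
      rintro ⟨-, rfl⟩
      rw [testBit_one_shiftLeft] at h
      simp at h
  | succ t => exact gstep_zero _ _ _ h

theorem Gt_bit (t j b : Nat) (h : Gt t j b ≠ 0) : b.testBit j = true := by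
  cases hb : b.testBit j
  · exact absurd (Gt_zero t j b hb) h
  · rfl

-- convexity of the visited set
def Conv (b : Nat) : Prop :=
  ∀ d e c : Nat, d ≤ c → c ≤ e → b.testBit d = true → b.testBit e = true → b.testBit c = true

theorem conv_single (j : Nat) : Conv (1 <<< j) := by
  intro d e c hdc hce hd he
  rw [testBit_one_shiftLeft] at hd he ⊢
  have : j = d := of_decide_eq_true hd
  have : j = e := of_decide_eq_true he
  exact decide_eq_true (by omega)

theorem conv_insert_adj (a i j : Nat) (hc : Conv a) (hi : a.testBit i = true)
    (hj : a.testBit j = false) (hadj : i + 1 = j ∨ j + 1 = i) :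
    Conv (a ||| 1 <<< j) := by
  intro d e c hdc hce hd he
  rw [Nat.testBit_or, testBit_one_shiftLeft] at hd he ⊢
  by_cases hcj : j = c
  · simp [hcj]
  rw [decide_eq_false hcj, Bool.or_false]
  have hd' : a.testBit d = true ∨ j = d := by
    rcases Bool.or_eq_true_iff.mp hd with h | h
    · exact Or.inl h
    · exact Or.inr (of_decide_eq_true h)
  have he' : a.testBit e = true ∨ j = e := by
    rcases Bool.or_eq_true_iff.mp he with h | h
    · exact Or.inl h
    · exact Or.inr (of_decide_eq_true h)
  -- replace an endpoint equal to j by the adjacent in-bit i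
  rcases hd' with hda | hdj <;> rcases he' with hea | hej
  · exact hc d e c hdc hce hda hea
  · -- e = j : then c < j (c ≠ j, c ≤ e = j), and in either adjacency case i works as top end
    subst hej
    have hce' : c ≤ i := by rcases hadj with h | h <;> omega
    exact hc d i c hdc hce' hda hi
  · subst hdj
    have hdc' : i ≤ c := by rcases hadj with h | h <;> omega
    exact hc i e c hdc' hce hi hea
  · omega

theorem sum_terms_zero (x1 x2 x3 x4 : Int) (g0 g9 : Prop) [Decidable g0] [Decidable g9]
    (h1 : x1 = 0) (h2 : x2 = 0) (h3 : x3 = 0) (h4 : x4 = 0) :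
    (if g0 then x1 + x2 else 0) + (if g9 then x3 + x4 else 0) = 0 := by
  subst h1 h2 h3 h4; split_ifs <;> simp

theorem Gt_succ_eq (t j b : Nat) : Gt (t+1) j b = gstep (Gt t) j b := rfl

theorem Gt_conv (t : Nat) : ∀ j b, Gt t j b ≠ 0 → Conv b := by
  induction t with
  | zero =>
      intro j b h
      have : 1 ≤ j ∧ b = 1 <<< j := by
        by_contra hc
        exact h (by simp [Gt, hc])
      rw [this.2]
      exact conv_single j
  | succ t ih =>
      intro j b h
      have hbj : b.testBit j = true := Gt_bit _ _ _ h
      have hxj : (b ^^^ 1 <<< j).testBit j = false := by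
        rw [Nat.testBit_xor, testBit_one_shiftLeft, hbj, decide_eq_true rfl]; rfl
      have hxlor : (b ^^^ (1 <<< j)) ||| (1 <<< j) = b := xor_lor b j hbj
      by_cases h1 : Gt t (j-1) b = 0 <;> by_cases h2 : Gt t (j-1) (b ^^^ 1 <<< j) = 0 <;>
        by_cases h3 : Gt t (j+1) b = 0 <;> by_cases h4 : Gt t (j+1) (b ^^^ 1 <<< j) = 0
      all_goals first
        | (exact ih _ _ h1)
        | (exact ih _ _ h3)
        | (-- only the xor-terms can be nonzero: b = (b⊕bitj) ∪ {j}
           first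
           | (have hnz := h2
              have hconv := ih _ _ hnz
              have hbit : (b ^^^ 1 <<< j).testBit (j-1) = true := Gt_bit _ _ _ hnz
              have hj1 : 0 < j := by
                by_contra hj0
                have hj0' : j = 0 := by omega
                subst hj0'
                simp only [Nat.sub_zero] at hnz hbit
                rw [hxj] at hbit
                exact Bool.false_ne_true hbit
              have := conv_insert_adj (b ^^^ 1 <<< j) (j-1) j hconv hbit hxj (Or.inl (by omega))
              rwa [hxlor] at this)
           | (have hnz := h4
              have hconv := ih _ _ hnz
              have hbit : (b ^^^ 1 <<< j).testBit (j+1) = true := Gt_bit _ _ _ hnz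
              have := conv_insert_adj (b ^^^ 1 <<< j) (j+1) j hconv hbit hxj (Or.inr rfl)
              rwa [hxlor] at this))
        | (exfalso
           apply h
           rw [Gt_succ_eq]
           unfold gstep
           rw [if_pos ((bit_mem b j).mpr hbj)]
           exact sum_terms_zero _ _ _ _ _ _ h1 h2 h3 h4)

theorem conv_full (b : Nat) (hb : b < 1024) (hc : Conv b)
    (h0 : b.testBit 0 = true) (h9 : b.testBit 9 = true) : b = 1023 := by
  apply Nat.eq_of_testBit_eq
  intro i
  by_cases hi : i < 10
  · have hbi : b.testBit i = true := hc 0 9 i (by omega) (by omega) h0 h9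
    have h1023 : (1023 : Nat).testBit i = true := by
      interval_cases i <;> decide
    rw [hbi, h1023]
  · have hbi : b.testBit i = false := Nat.testBit_eq_false_of_lt (by
      calc b < 1024 := hb
        _ ≤ 2 ^ i := by
          calc (1024 : Nat) = 2 ^ 10 := by norm_num
            _ ≤ 2 ^ i := Nat.pow_le_pow_right (by norm_num) (by omega))
    have h1023 : (1023 : Nat).testBit i = false := Nat.testBit_eq_false_of_lt (by
      calc (1023 : Nat) < 1024 := by norm_num
        _ ≤ 2 ^ i := by
          calc (1024 : Nat) = 2 ^ 10 := by norm_num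
            _ ≤ 2 ^ i := Nat.pow_le_pow_right (by norm_num) (by omega))
    rw [hbi, h1023]

-- restricted mask sums
def Smask (p : Nat → Bool) (t j : Nat) : Int :=
  ∑ b ∈ Finset.range 1024, (if p b then Gt t j b else 0)

-- per-digit inclusion-exclusion: Gt at the full mask = all − miss0 − miss9 + missBoth
theorem Gt_full_IE (t j : Nat) :
    Gt t j 1023 = Smask (fun _ => true) t j - Smask (fun b => !b.testBit 0) t j
      - Smask (fun b => !b.testBit 9) t j + Smask (fun b => !b.testBit 0 && !b.testBit 9) t j := by
  unfold Smask
  rw [← Finset.sum_sub_distrib, ← Finset.sum_sub_distrib, ← Finset.sum_add_distrib]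
  have hpt : ∀ b ∈ Finset.range 1024,
      ((if true then Gt t j b else 0) - (if !b.testBit 0 then Gt t j b else 0)
        - (if !b.testBit 9 then Gt t j b else 0)
        + (if !b.testBit 0 && !b.testBit 9 then Gt t j b else 0))
      = (if b = 1023 then Gt t j 1023 else 0) := by
    intro b hb
    have hb' : b < 1024 := Finset.mem_range.mp hb
    cases h0 : b.testBit 0 <;> cases h9 : b.testBit 9
    · have : b ≠ 1023 := by rintro rfl; exact absurd h0 (by decide)
      simp [h0, h9, this]
    · have : b ≠ 1023 := by rintro rfl; exact absurd h0 (by decide)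
      simp [h0, h9, this]
    · have : b ≠ 1023 := by rintro rfl; exact absurd h9 (by decide)
      simp [h0, h9, this]
    · by_cases hbe : b = 1023
      · subst hbe; simp [h0, h9]
      · have hz : Gt t j b = 0 := by
          by_contra hnz
          exact hbe (conv_full b hb' (Gt_conv t j b hnz) h0 h9)
        simp [h0, h9, hz, hbe]
  rw [Finset.sum_congr rfl hpt, Finset.sum_ite_eq' (Finset.range 1024) 1023 (fun _ => Gt t j 1023)]
  rw [if_pos (Finset.mem_range.mpr (by norm_num))]

-- the key transfer: a restricted mask sum of gstep becomes the unmasked neighbour sums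
theorem sum_gstep (p : Nat → Bool) (j : Nat) (hj : j < 10)
    (hc : ∀ k, k < 1024 → p (k ||| (1 <<< j)) = p k) (F : Nat → Nat → Int) :
    (∑ b ∈ Finset.range 1024, if p b then gstep F j b else 0)
      = ∑ k ∈ Finset.range 1024,
          (if p k then (if 0 < j then F (j-1) k else 0) + (if j < 9 then F (j+1) k else 0) else 0) := by
  set v : Nat → Int := fun k => (if 0 < j then F (j-1) k else 0) + (if j < 9 then F (j+1) k else 0) with hv
  have hg : ∀ b, gstep F j b = if b.testBit j = true then v b + v (b ^^^ (1 <<< j)) else 0 := by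
    intro b
    unfold gstep
    by_cases hb : b.testBit j = true
    · rw [if_pos ((bit_mem b j).mpr hb), if_pos hb, hv]
      split_ifs <;> ring
    · rw [if_neg (fun hcon => hb ((bit_mem b j).mp hcon)), if_neg hb]
  have hsplit : ∀ b, (if p b then gstep F j b else 0)
      = (if p b ∧ b.testBit j = true then v b else 0)
        + (if p b ∧ b.testBit j = true then v (b ^^^ (1 <<< j)) else 0) := by
    intro b
    rw [hg]
    by_cases hp : p b <;> by_cases hb : b.testBit j = true <;> simp [hp, hb]
  rw [Finset.sum_congr rfl (fun b _ => hsplit b), Finset.sum_add_distrib]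
  -- second sum: reindex by xor with the j-bit
  have hxorsum :
      (∑ b ∈ Finset.range 1024, if p b ∧ b.testBit j = true then v (b ^^^ (1 <<< j)) else 0)
        = ∑ k ∈ Finset.range 1024, if p k ∧ k.testBit j = false then v k else 0 := by
    apply Finset.sum_nbij' (fun b => b ^^^ (1 <<< j)) (fun k => k ^^^ (1 <<< j))
    · intro b hb
      exact Finset.mem_range.mpr (xor_lt b j (Finset.mem_range.mp hb) hj)
    · intro k hk
      exact Finset.mem_range.mpr (xor_lt k j (Finset.mem_range.mp hk) hj)
    · intro b _; simp
    · intro k _; simp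
    · intro b hb
      have hxx : (b ^^^ (1 <<< j)).testBit j = !b.testBit j := by
        rw [Nat.testBit_xor, testBit_one_shiftLeft, decide_eq_true rfl, Bool.xor_true]
      by_cases hbj : b.testBit j = true
      · have hx : (b ^^^ (1 <<< j)).testBit j = false := by rw [hxx, hbj]; rfl
        have hpe : p (b ^^^ (1 <<< j)) = p b := by
          rw [← hc (b ^^^ (1 <<< j)) (xor_lt b j (Finset.mem_range.mp hb) hj), xor_lor b j hbj]
        by_cases hp : p b
        · rw [if_pos ⟨hp, hbj⟩, if_pos ⟨by rw [hpe]; exact hp, hx⟩]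
        · rw [if_neg (fun hcon => hp hcon.1), if_neg (fun hcon => hp (by rw [← hpe]; exact hcon.1))]
      · have hbj' : b.testBit j = false := Bool.not_eq_true _ ▸ (by simpa using hbj)
        have hx : (b ^^^ (1 <<< j)).testBit j = true := by rw [hxx, hbj']; rfl
        rw [if_neg (fun hcon => hbj hcon.2), if_neg (fun hcon => by
          rw [hx] at hcon; exact absurd hcon.2 (by simp))]
  rw [hxorsum, ← Finset.sum_add_distrib]
  apply Finset.sum_congr rfl
  intro k _
  by_cases hp : p k
  · cases hkj : k.testBit j
    · rw [if_neg (fun hcon => absurd hcon.2 (by simp)), if_pos ⟨hp, rfl⟩, if_pos hp]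
      ring
    · rw [if_pos ⟨hp, rfl⟩, if_neg (fun hcon => absurd hcon.2 (by simp)), if_pos hp]
      ring
  · rw [if_neg (fun hcon => hp hcon.1), if_neg (fun hcon => hp hcon.1), if_neg hp]
    ring

-- the unmasked walk DP on the digit path [lo, hi]
def Wt (lo hi : Nat) : Nat → Nat → Int
  | 0, j => if 1 ≤ j then 1 else 0
  | (t+1), j => (if lo < j then Wt lo hi t (j-1) else 0) + (if j < hi then Wt lo hi t (j+1) else 0)

-- a restricted mask sum vanishes at a digit the restriction forbids
theorem Smask_out (p : Nat → Bool) (d t : Nat)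
    (hout : ∀ k, k < 1024 → p k = true → k.testBit d = false) :
    Smask p t d = 0 := by
  unfold Smask
  apply Finset.sum_eq_zero
  intro k hk
  by_cases hp : p k
  · rw [if_pos hp, Gt_zero t d k (hout k (Finset.mem_range.mp hk) hp)]
  · rw [if_neg hp]

-- boundary vanishing packaged for the walk lemma
theorem Smask_eq_Wt (p : Nat → Bool) (lo hi : Nat) (hhi : hi ≤ 9) (hlohi : lo ≤ hi)
    (hc : ∀ k j, k < 1024 → lo ≤ j → j ≤ hi → p (k ||| (1 <<< j)) = p k)
    (hb : ∀ j, lo ≤ j → j ≤ hi → p (1 <<< j) = true)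
    (hzl : 0 < lo → ∀ k, k < 1024 → p k = true → k.testBit (lo-1) = false)
    (hzh : hi < 9 → ∀ k, k < 1024 → p k = true → k.testBit (hi+1) = false) :
    ∀ t j, lo ≤ j → j ≤ hi → Smask p t j = Wt lo hi t j := by
  intro t
  induction t with
  | zero =>
      intro j hlo hhi'
      unfold Smask
      have hGt0 : ∀ b, Gt 0 j b = if 1 ≤ j ∧ b = 1 <<< j then (1:Int) else 0 := fun b => rfl
      have hW0 : Wt lo hi 0 j = if 1 ≤ j then (1:Int) else 0 := rfl
      rw [hW0]
      have hpt : ∀ b ∈ Finset.range 1024,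
          (if p b then Gt 0 j b else 0)
            = if b = 1 <<< j then (if 1 ≤ j then (1:Int) else 0) else 0 := by
        intro b _
        rw [hGt0]
        by_cases hbe : b = 1 <<< j
        · subst hbe
          rw [if_pos (hb j hlo hhi'), if_pos rfl]
          by_cases h1 : 1 ≤ j <;> simp [h1]
        · by_cases hp : p b <;> simp [hp, hbe]
      rw [Finset.sum_congr rfl hpt,
          Finset.sum_ite_eq' (Finset.range 1024) (1 <<< j) (fun _ => if 1 ≤ j then (1:Int) else 0)]
      rw [if_pos (Finset.mem_range.mpr (by
        rw [Nat.one_shiftLeft]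
        calc (2:Nat) ^ j ≤ 2 ^ 9 := Nat.pow_le_pow_right (by norm_num) (by omega)
          _ < 1024 := by norm_num))]
  | succ t ih =>
      intro j hlo hhi'
      have hj10 : j < 10 := by omega
      have hGts : ∀ b, Gt (t+1) j b = gstep (Gt t) j b := fun b => rfl
      have hWs : Wt lo hi (t+1) j
          = (if lo < j then Wt lo hi t (j-1) else 0) + (if j < hi then Wt lo hi t (j+1) else 0) := rfl
      unfold Smask
      rw [Finset.sum_congr rfl (fun b _ => by rw [hGts]),
          sum_gstep p j hj10 (fun k hk => hc k j hk hlo hhi') (Gt t), hWs]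
      have hsplit : ∀ k : Nat,
          (if p k then (if 0 < j then Gt t (j-1) k else 0) + (if j < 9 then Gt t (j+1) k else 0) else 0)
            = (if 0 < j then (if p k then Gt t (j-1) k else 0) else 0)
              + (if j < 9 then (if p k then Gt t (j+1) k else 0) else 0) := by
        intro k
        by_cases hp : p k <;> by_cases h0 : 0 < j <;> by_cases h9 : j < 9 <;> simp [hp, h0, h9]
      rw [Finset.sum_congr rfl (fun k _ => hsplit k), Finset.sum_add_distrib]
      have hleft : (∑ k ∈ Finset.range 1024, if 0 < j then (if p k then Gt t (j-1) k else 0) else 0)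
          = (if lo < j then Wt lo hi t (j-1) else 0) := by
        by_cases h0 : 0 < j
        · rw [Finset.sum_congr rfl (fun k _ => if_pos h0)]
          by_cases hlj : lo < j
          · rw [if_pos hlj, ← ih (j-1) (by omega) (by omega)]; rfl
          · -- j = lo > 0 : the restricted sum at digit lo-1 vanishes
            have hjlo : j = lo := by omega
            rw [if_neg hlj]
            have := Smask_out p (j-1) t (by
              intro k hk hp
              have := hzl (by omega) k hk hp
              rwa [show lo - 1 = j - 1 from by omega] at this)
            unfold Smask at this
            exact this
        · rw [if_neg (by omega : ¬ lo < j)]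
          exact Finset.sum_eq_zero (fun k _ => if_neg h0)
      have hright : (∑ k ∈ Finset.range 1024, if j < 9 then (if p k then Gt t (j+1) k else 0) else 0)
          = (if j < hi then Wt lo hi t (j+1) else 0) := by
        by_cases h9 : j < 9
        · rw [Finset.sum_congr rfl (fun k _ => if_pos h9)]
          by_cases hjh : j < hi
          · rw [if_pos hjh, ← ih (j+1) (by omega) (by omega)]; rfl
          · have hjhi : j = hi := by omega
            rw [if_neg hjh]
            have := Smask_out p (j+1) t (by
              intro k hk hp
              have := hzh (by omega) k hk hp
              rwa [show hi + 1 = j + 1 from by omega] at this)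
            unfold Smask at this
            exact this
        · rw [if_neg (by omega : ¬ j < hi)]
          exact Finset.sum_eq_zero (fun k _ => if_neg h9)
      rw [hleft, hright]

-- the four instances
theorem or_bit_other (k j d : Nat) (h : j ≠ d) :
    (k ||| (1 <<< j)).testBit d = k.testBit d := by
  rw [Nat.testBit_or, testBit_one_shiftLeft, decide_eq_false h, Bool.or_false]

theorem SAll_eq (t j : Nat) (h0 : j ≤ 9) :
    Smask (fun _ => true) t j = Wt 0 9 t j := by
  exact Smask_eq_Wt (fun _ => true) 0 9 (by norm_num) (by norm_num)
    (fun _ _ _ _ _ => rfl) (fun _ _ _ => rfl)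
    (fun h => by omega) (fun h => by omega) t j (by omega) h0

theorem S0_eq (t j : Nat) (h1 : 1 ≤ j) (h9 : j ≤ 9) :
    Smask (fun b => !b.testBit 0) t j = Wt 1 9 t j := by
  refine Smask_eq_Wt (fun b => !b.testBit 0) 1 9 (by norm_num) (by norm_num) ?_ ?_ ?_ ?_ t j h1 h9
  · intro k j' _ hlo _
    show (!(k ||| 1 <<< j').testBit 0) = (!k.testBit 0)
    rw [or_bit_other k j' 0 (by omega)]
  · intro j' hlo _
    show (!(1 <<< j').testBit 0) = true
    rw [testBit_one_shiftLeft, decide_eq_false (by omega : j' ≠ 0)]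
    rfl
  · intro _ k _ hp
    simpa using hp
  · intro h; omega

theorem S0_zero (t : Nat) : Smask (fun b => !b.testBit 0) t 0 = 0 := by
  apply Smask_out
  intro k _ hp
  simpa using hp

theorem S9_eq (t j : Nat) (h9 : j ≤ 8) :
    Smask (fun b => !b.testBit 9) t j = Wt 0 8 t j := by
  refine Smask_eq_Wt (fun b => !b.testBit 9) 0 8 (by norm_num) (by norm_num) ?_ ?_ ?_ ?_ t j (by omega) h9
  · intro k j' _ _ hhi
    show (!(k ||| 1 <<< j').testBit 9) = (!k.testBit 9)
    rw [or_bit_other k j' 9 (by omega)]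
  · intro j' _ hhi
    show (!(1 <<< j').testBit 9) = true
    rw [testBit_one_shiftLeft, decide_eq_false (by omega : j' ≠ 9)]
    rfl
  · intro h; omega
  · intro _ k _ hp
    simpa using hp

theorem S9_zero (t : Nat) : Smask (fun b => !b.testBit 9) t 9 = 0 := by
  apply Smask_out
  intro k _ hp
  simpa using hp

theorem S09_eq (t j : Nat) (h1 : 1 ≤ j) (h8 : j ≤ 8) :
    Smask (fun b => !b.testBit 0 && !b.testBit 9) t j = Wt 1 8 t j := by
  refine Smask_eq_Wt (fun b => !b.testBit 0 && !b.testBit 9) 1 8 (by norm_num) (by norm_num)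
    ?_ ?_ ?_ ?_ t j h1 h8
  · intro k j' _ hlo hhi
    show (!(k ||| 1 <<< j').testBit 0 && !(k ||| 1 <<< j').testBit 9) = (!k.testBit 0 && !k.testBit 9)
    rw [or_bit_other k j' 0 (by omega), or_bit_other k j' 9 (by omega)]
  · intro j' hlo hhi
    show (!(1 <<< j').testBit 0 && !(1 <<< j').testBit 9) = true
    rw [testBit_one_shiftLeft, decide_eq_false (by omega : j' ≠ 0),
        testBit_one_shiftLeft, decide_eq_false (by omega : j' ≠ 9)]
    rfl
  · intro _ k _ hp
    have := (Bool.and_eq_true _ _).mp hp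
    simpa using this.1
  · intro _ k _ hp
    have := (Bool.and_eq_true _ _).mp hp
    simpa using this.2

theorem S09_zero0 (t : Nat) : Smask (fun b => !b.testBit 0 && !b.testBit 9) t 0 = 0 := by
  apply Smask_out
  intro k _ hp
  have := (Bool.and_eq_true _ _).mp hp
  simpa using this.1

theorem S09_zero9 (t : Nat) : Smask (fun b => !b.testBit 0 && !b.testBit 9) t 9 = 0 := by
  apply Smask_out
  intro k _ hp
  have := (Bool.and_eq_true _ _).mp hp
  simpa using this.2

-- ---------- B side: the walk lists compute Wt ----------
theorem bWalkInit_skip (hi : Nat) :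
    bWalkInit (hi+1) true = (List.range (hi+1)).map (fun v => Wt 0 hi 0 (v+0)) := by
  unfold bWalkInit
  apply List.map_congr_left
  intro v _
  show (if true = true ∧ v = 0 then (0:Int) else 1) = Wt 0 hi 0 (v+0)
  have : Wt 0 hi 0 (v+0) = if 1 ≤ v + 0 then (1:Int) else 0 := rfl
  rw [this]
  by_cases hv : v = 0
  · subst hv; simp
  · rw [if_neg (by simp [hv]), if_pos (by omega)]

theorem bWalkInit_noskip (lo hi : Nat) (hlo : 1 ≤ lo) :
    bWalkInit (hi+1-lo) false = (List.range (hi+1-lo)).map (fun v => Wt lo hi 0 (v+lo)) := by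
  unfold bWalkInit
  apply List.map_congr_left
  intro v _
  show (if False ∧ v = 0 then (0:Int) else 1) = Wt lo hi 0 (v+lo)
  have : Wt lo hi 0 (v+lo) = if 1 ≤ v + lo then (1:Int) else 0 := rfl
  rw [this, if_neg (by simp), if_pos (by omega)]

theorem bWalkStep_map (lo hi t : Nat) (hlo : lo ≤ hi) :
    bWalkStep (hi+1-lo) ((List.range (hi+1-lo)).map (fun v => Wt lo hi t (v+lo)))
      = (List.range (hi+1-lo)).map (fun v => Wt lo hi (t+1) (v+lo)) := by
  unfold bWalkStep
  apply List.map_congr_left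
  intro v hv
  have hvm : v < hi+1-lo := List.mem_range.mp hv
  have hW : Wt lo hi (t+1) (v+lo)
      = (if lo < v+lo then Wt lo hi t (v+lo-1) else 0)
        + (if v+lo < hi then Wt lo hi t (v+lo+1) else 0) := rfl
  rw [hW]
  congr 1
  · by_cases h0 : 0 < v
    · rw [if_pos h0, if_pos (by omega),
          PySem.List.getD_map_range _ _ _ _ (by omega : v - 1 < hi+1-lo)]
      rw [show v - 1 + lo = v + lo - 1 from by omega]
    · rw [if_neg h0, if_neg (by omega)]
  · by_cases h1 : v < hi+1-lo-1
    · rw [if_pos h1, if_pos (by omega),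
          PySem.List.getD_map_range _ _ _ _ (by omega : v + 1 < hi+1-lo)]
      rw [show v + 1 + lo = v + lo + 1 from by omega]
    · rw [if_neg h1, if_neg (by omega)]

theorem bWalkFold (lo hi : Nat) (hlo : lo ≤ hi) (xs : List Int) :
    ∀ t, xs.foldl (fun cur _ => bWalkStep (hi+1-lo) cur)
        ((List.range (hi+1-lo)).map (fun v => Wt lo hi t (v+lo)))
      = (List.range (hi+1-lo)).map (fun v => Wt lo hi (t + xs.length) (v+lo)) := by
  induction xs with
  | nil => intro t; simp
  | cons x xs ih =>
      intro t
      rw [List.foldl_cons, bWalkStep_map lo hi t hlo, ih (t+1), List.length_cons,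
          show t + 1 + xs.length = t + (xs.length + 1) from by omega]

-- bWalks at a positive length, for each of the four path instances
theorem bWalks_eq (n : Nat) (hn : 1 ≤ n) (lo hi : Nat) (hlo : lo ≤ hi) (skip : Bool)
    (hinit : bWalkInit (hi+1-lo) skip = (List.range (hi+1-lo)).map (fun v => Wt lo hi 0 (v+lo))) :
    bWalks (n : Int) (hi+1-lo) skip
      = ((List.range (hi+1-lo)).map (fun v => Wt lo hi (n-1) (v+lo))).sum := by
  unfold bWalks
  rw [hinit, bWalkFold lo hi hlo _ 0, PySem.List.length_pyRange_one,
      show (((n : Int) - 1) - 0).toNat = n - 1 from by omega, Nat.zero_add]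

-- ---------- final assembly ----------
theorem L_equal (length : Int) (hpre : Pre_solve length) : solveL length = solve_alt length := by
  unfold Pre_solve at hpre
  obtain ⟨n, rfl⟩ : ∃ n : Nat, length = (n : Int) := ⟨length.toNat, by omega⟩
  have hn : 1 ≤ n := by exact_mod_cast hpre
  have hA : aMainL (n : Int) = ((List.range (n-1)).map (fun t => Lmap (Gt t))) ++ [Lmap (Gt (n-1))] := by
    unfold aMainL
    rw [aInit_eq n hn, main_inv n hn n hn le_rfl]
    unfold rowsUpTo
    conv_lhs => rw [show n = (n-1)+1 from (by omega)]
    rw [List.range_succ, List.map_append]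
    simp
  unfold solveL
  rw [hA, PySem.List.pyGet?_neg_one_append_singleton]
  show PySem.Int.mod ((List.range 10).foldl
      (fun s i => s + (((Lmap (Gt (n-1))).getD i []).getD 1023 0)) 0) 1000000000 = solve_alt (n : Int)
  -- A side: explicit ten-term sum of Gt (n-1) j 1023
  have hAsum : (List.range 10).foldl (fun s i => s + (((Lmap (Gt (n-1))).getD i []).getD 1023 0)) 0
      = Gt (n-1) 0 1023 + Gt (n-1) 1 1023 + Gt (n-1) 2 1023 + Gt (n-1) 3 1023
        + Gt (n-1) 4 1023 + Gt (n-1) 5 1023 + Gt (n-1) 6 1023 + Gt (n-1) 7 1023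
        + Gt (n-1) 8 1023 + Gt (n-1) 9 1023 := by
    simp only [show (10:Nat) = 9+1 from rfl, List.range_succ, List.range_zero,
      List.foldl_append, List.foldl_cons, List.foldl_nil, List.nil_append, List.append_assoc,
      List.cons_append]
    rw [Lmap_get _ 0 1023 (by norm_num) (by norm_num), Lmap_get _ 1 1023 (by norm_num) (by norm_num),
        Lmap_get _ 2 1023 (by norm_num) (by norm_num), Lmap_get _ 3 1023 (by norm_num) (by norm_num),
        Lmap_get _ 4 1023 (by norm_num) (by norm_num), Lmap_get _ 5 1023 (by norm_num) (by norm_num),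
        Lmap_get _ 6 1023 (by norm_num) (by norm_num), Lmap_get _ 7 1023 (by norm_num) (by norm_num),
        Lmap_get _ 8 1023 (by norm_num) (by norm_num), Lmap_get _ 9 1023 (by norm_num) (by norm_num)]
    ring
  rw [hAsum]
  unfold solve_alt
  -- B side: the four walk sums as explicit Wt sums
  have h10 : bWalks (n : Int) 10 true
      = ((List.range 10).map (fun v => Wt 0 9 (n-1) (v+0))).sum := by
    exact bWalks_eq n hn 0 9 (by norm_num) true (bWalkInit_skip 9)
  have h9f : bWalks (n : Int) 9 false
      = ((List.range 9).map (fun v => Wt 1 9 (n-1) (v+1))).sum := by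
    exact bWalks_eq n hn 1 9 (by norm_num) false (bWalkInit_noskip 1 9 (by norm_num))
  have h9t : bWalks (n : Int) 9 true
      = ((List.range 9).map (fun v => Wt 0 8 (n-1) (v+0))).sum := by
    exact bWalks_eq n hn 0 8 (by norm_num) true (bWalkInit_skip 8)
  have h8f : bWalks (n : Int) 8 false
      = ((List.range 8).map (fun v => Wt 1 8 (n-1) (v+1))).sum := by
    exact bWalks_eq n hn 1 8 (by norm_num) false (bWalkInit_noskip 1 8 (by norm_num))
  rw [h10, h9f, h9t, h8f]
  refine congrArg (fun z : Int => PySem.Int.mod z 1000000000) ?_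
  -- expand the four sums and apply inclusion-exclusion per digit
  rw [show List.range 10 = [0,1,2,3,4,5,6,7,8,9] from rfl,
      show List.range 9 = [0,1,2,3,4,5,6,7,8] from rfl,
      show List.range 8 = [0,1,2,3,4,5,6,7] from rfl]
  simp only [List.map_cons, List.map_nil, List.sum_cons, List.sum_nil]
  norm_num
  rw [Gt_full_IE (n-1) 0, Gt_full_IE (n-1) 1, Gt_full_IE (n-1) 2, Gt_full_IE (n-1) 3,
      Gt_full_IE (n-1) 4, Gt_full_IE (n-1) 5, Gt_full_IE (n-1) 6, Gt_full_IE (n-1) 7,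
      Gt_full_IE (n-1) 8, Gt_full_IE (n-1) 9]
  rw [SAll_eq (n-1) 0 (by norm_num), SAll_eq (n-1) 1 (by norm_num), SAll_eq (n-1) 2 (by norm_num),
      SAll_eq (n-1) 3 (by norm_num), SAll_eq (n-1) 4 (by norm_num), SAll_eq (n-1) 5 (by norm_num),
      SAll_eq (n-1) 6 (by norm_num), SAll_eq (n-1) 7 (by norm_num), SAll_eq (n-1) 8 (by norm_num),
      SAll_eq (n-1) 9 (by norm_num)]
  rw [S0_zero (n-1), S0_eq (n-1) 1 (by norm_num) (by norm_num), S0_eq (n-1) 2 (by norm_num) (by norm_num),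
      S0_eq (n-1) 3 (by norm_num) (by norm_num), S0_eq (n-1) 4 (by norm_num) (by norm_num),
      S0_eq (n-1) 5 (by norm_num) (by norm_num), S0_eq (n-1) 6 (by norm_num) (by norm_num),
      S0_eq (n-1) 7 (by norm_num) (by norm_num), S0_eq (n-1) 8 (by norm_num) (by norm_num),
      S0_eq (n-1) 9 (by norm_num) (by norm_num)]
  rw [S9_zero (n-1), S9_eq (n-1) 0 (by norm_num), S9_eq (n-1) 1 (by norm_num),
      S9_eq (n-1) 2 (by norm_num), S9_eq (n-1) 3 (by norm_num), S9_eq (n-1) 4 (by norm_num),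
      S9_eq (n-1) 5 (by norm_num), S9_eq (n-1) 6 (by norm_num), S9_eq (n-1) 7 (by norm_num),
      S9_eq (n-1) 8 (by norm_num)]
  rw [S09_zero0 (n-1), S09_zero9 (n-1), S09_eq (n-1) 1 (by norm_num) (by norm_num),
      S09_eq (n-1) 2 (by norm_num) (by norm_num), S09_eq (n-1) 3 (by norm_num) (by norm_num),
      S09_eq (n-1) 4 (by norm_num) (by norm_num), S09_eq (n-1) 5 (by norm_num) (by norm_num),
      S09_eq (n-1) 6 (by norm_num) (by norm_num), S09_eq (n-1) 7 (by norm_num) (by norm_num),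
      S09_eq (n-1) 8 (by norm_num) (by norm_num)]
  ring

-- ===== VERDICT (by name: the statement is the Claim_ definition above) =====
theorem solve_spec : Claim_equal_solve := by
  unfold Claim_equal_solve
  intro length hdom hpre
  unfold Spec_solve
  rw [solve_eq_solveL]
  exact L_equal length hpre

set_option maxRecDepth 4000 in
@[simp] theorem solve_raises : Claim_raises_solve := by
  unfold Claim_raises_solve
  constructor
  · intro length _ hr hp
    unfold Raises_solve at hr
    unfold Pre_solve at hp
    omega
  · refine ⟨by decide, by decide, by decide⟩
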